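-- pv_equiv track=rewrite | github.com/VictorDron/StoneLive.py | analysis/base_1.py | countBasesByState
-- ===== SOURCE A (Python) =====
-- def countBasesByState(data):
--     stateBases = {}
--     for row in data:
--         state = row['country_state']
--         base = row['base']
--         if state not in stateBases:
--             stateBases[state] = set()
--         stateBases[state].add(base)
--     stateBaseCount = {state: len(bases) for state, bases in stateBases.items()}
--     return stateBaseCount
-- ===== SOURCE B (Python) =====
-- def countBasesByState(data):
--     seen = set()
--     counts = {}
--     for row in data:
--         key = (row['country_state'], row['base'])
--         if key not in seen:
--             seen.add(key)
--             counts[key[0]] = counts.get(key[0], 0) + 1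
--     return counts
-- ===== Notes on version B (the rewrite author's own statement) =====
-- stated objective: alternative
-- what changed: Replaces A's dict-of-sets grouping plus a second len-comprehension pass with one flat set of (state, base) pairs and an integer counter dict updated incrementally in a single pass.
import Mathlib
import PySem

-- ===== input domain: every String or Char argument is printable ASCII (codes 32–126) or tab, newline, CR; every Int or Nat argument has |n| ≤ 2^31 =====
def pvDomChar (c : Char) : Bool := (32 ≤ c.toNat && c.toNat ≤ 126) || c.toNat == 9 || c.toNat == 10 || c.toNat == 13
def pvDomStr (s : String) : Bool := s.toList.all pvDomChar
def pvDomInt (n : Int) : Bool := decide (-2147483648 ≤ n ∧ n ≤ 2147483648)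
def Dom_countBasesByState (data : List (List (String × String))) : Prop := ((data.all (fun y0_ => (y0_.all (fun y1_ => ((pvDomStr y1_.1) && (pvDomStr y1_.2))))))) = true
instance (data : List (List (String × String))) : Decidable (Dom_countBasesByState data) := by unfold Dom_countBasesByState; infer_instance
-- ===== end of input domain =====

-- B replaces A's dict-of-sets grouping plus a second len-comprehension pass with a single
-- pass over one flat set of (state, base) pairs and an incrementally updated counter dict.


-- shared helper: row[k]; Pre_ guarantees the key is present, so the "" default is never used
def pvLookup (row : List (String × String)) (k : String) : String :=
  ((PySem.Dict.mk row).get? k).getD ""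

-- ===== PORT A =====
-- loop body of A: setdefault-style grouping of bases into a per-state set
def pvStepA (d : PySem.Dict String (PySem.Set String)) (row : List (String × String)) : PySem.Dict String (PySem.Set String) :=
  let state := pvLookup row "country_state"
  let base := pvLookup row "base"
  let d := if d.contains state then d else d.insert state PySem.Set.empty
  d.insert state (PySem.Set.add (d.getD state PySem.Set.empty) base)

def countBasesByState (data : List (List (String × String))) : List (String × Int) :=
  let stateBases := data.foldl pvStepA PySem.Dict.empty
  (stateBases.items.map (fun p => (p.1, (p.2.length : Int))))

-- ===== PORT B =====
-- loop body of B: one flat pair-set `seen` and an incremental counter dict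
def pvStepB (acc : PySem.Set (String × String) × PySem.Dict String Int) (row : List (String × String)) : PySem.Set (String × String) × PySem.Dict String Int :=
  let key := (pvLookup row "country_state", pvLookup row "base")
  if PySem.Set.contains acc.1 key then acc
  else (PySem.Set.add acc.1 key, acc.2.insert key.1 (acc.2.getD key.1 0 + 1))

def countBasesByState_alt (data : List (List (String × String))) : List (String × Int) :=
  (data.foldl pvStepB (PySem.Set.empty, PySem.Dict.empty)).2.items

-- ===== PRECONDITION & SPEC =====
-- Pre_ excludes exactly the inputs on which the Python A raises KeyError (a row missing one of the two keys)
def Pre_countBasesByState (data : List (List (String × String))) : Prop :=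
  ∀ row ∈ data, (PySem.Dict.mk row).contains "country_state" = true ∧
                (PySem.Dict.mk row).contains "base" = true
instance (data : List (List (String × String))) : Decidable (Pre_countBasesByState data) := by unfold Pre_countBasesByState; infer_instance

def pvWitness_countBasesByState : (List (List (String × String))) :=
  [[("country_state", "SP"), ("base", "b1")], [("country_state", "SP"), ("base", "b2")]]

def Spec_countBasesByState (data : List (List (String × String))) (out : List (String × Int)) : Prop := out = countBasesByState_alt data
instance (data : List (List (String × String))) (out : List (String × Int)) : Decidable (Spec_countBasesByState data out) := by unfold Spec_countBasesByState; infer_instance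

-- ===== CLAIM (what is proved, stated in full; the proofs are below) =====
def Claim_equal_countBasesByState : Prop := ∀ (data : List (List (String × String))), Dom_countBasesByState data → Pre_countBasesByState data → Spec_countBasesByState data (countBasesByState data)

-- ===== LEMMAS AND PROOFS =====

-- the per-state set projected to its size
def pvF (p : String × PySem.Set String) : String × Int := (p.1, (p.2.length : Int))

-- step A collapses to a single insert
lemma pvStepA_eq (d : PySem.Dict String (PySem.Set String)) (row : List (String × String)) :
    pvStepA d row = d.insert (pvLookup row "country_state")
      (PySem.Set.add (d.getD (pvLookup row "country_state") PySem.Set.empty) (pvLookup row "base")) := by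
  unfold pvStepA
  by_cases hc : d.contains (pvLookup row "country_state") = true
  · simp [hc]
  · simp only [Bool.not_eq_true] at hc
    simp [hc, PySem.Dict.insert_insert_self, PySem.Dict.getD_insert_self,
      PySem.Dict.getD_of_not_contains d _ hc]

-- inserting the stored value changes nothing
lemma pv_insert_getD_self (d : PySem.Dict String (PySem.Set String)) (k : String)
    (hnd : d.keys.Nodup) (hc : d.contains k = true) :
    d.insert k (d.getD k PySem.Set.empty) = d := by
  apply PySem.Dict.ext
  rw [PySem.Dict.items_insert_of_contains d _ hc]
  conv_rhs => rw [← List.map_id d.items]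
  apply List.map_congr_left
  intro p hp
  obtain ⟨k1, v⟩ := p
  by_cases hpk : k1 = k
  · subst hpk
    have hg := PySem.Dict.getD_of_mem_items d hp hnd PySem.Set.empty
    simp only [PySem.Set.empty] at hg
    simp [hg]
  · simp [hpk]

lemma pv_keys_eq (counts : PySem.Dict String Int) (d : PySem.Dict String (PySem.Set String))
    (h : counts.items = d.items.map pvF) : counts.keys = d.keys := by
  simp only [PySem.Dict.keys, h, List.map_map]
  rfl

lemma pv_loop (data : List (List (String × String))) :
    ∀ (d : PySem.Dict String (PySem.Set String)) (seen : PySem.Set (String × String))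
      (counts : PySem.Dict String Int),
      d.keys.Nodup →
      counts.items = d.items.map pvF →
      (∀ st b, PySem.Set.contains seen (st, b) = PySem.Set.contains (d.getD st PySem.Set.empty) b) →
      (data.foldl pvStepA d).items.map pvF = (data.foldl pvStepB (seen, counts)).2.items := by
  induction data with
  | nil => intro d seen counts _ hitems _; simp [hitems]
  | cons row rows ih =>
    intro d seen counts hnd hitems hseen
    simp only [List.foldl_cons]
    set st := pvLookup row "country_state" with hst
    set b := pvLookup row "base" with hb
    by_cases hmem : b ∈ d.getD st PySem.Set.empty
    · have hmem0 : b ∈ d.getD st ([] : List String) := hmem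
      -- already seen: both steps are no-ops
      have hcont : d.contains st = true := by
        by_contra hc
        simp only [Bool.not_eq_true] at hc
        rw [PySem.Dict.getD_of_not_contains d _ hc] at hmem
        simp [PySem.Set.empty] at hmem
      have hA : pvStepA d row = d := by
        rw [pvStepA_eq, ← hst, ← hb]
        have h1 : PySem.Set.add (d.getD st PySem.Set.empty) b = d.getD st PySem.Set.empty := by
          simp [PySem.Set.add, PySem.Set.empty, hmem0]
        rw [h1, pv_insert_getD_self d st hnd hcont]
      have hB : pvStepB (seen, counts) row = (seen, counts) := by
        unfold pvStepB
        simp only [← hst, ← hb]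
        have h2 : (st, b) ∈ seen := by
          have h := hseen st b
          simp only [PySem.Set.contains] at h
          rw [← List.contains_iff_mem, h, List.contains_iff_mem]
          exact hmem
        simp [h2]
      rw [hA, hB]
      exact ih d seen counts hnd hitems hseen
    · have hcf : PySem.Set.contains seen (st, b) = false := by
        rw [hseen st b]; simpa [PySem.Set.contains] using hmem
      have hns : (st, b) ∉ seen := by simpa [PySem.Set.contains] using hcf
      have hB : pvStepB (seen, counts) row
          = (PySem.Set.add seen (st, b), counts.insert st (counts.getD st 0 + 1)) := by
        unfold pvStepB
        simp only [← hst, ← hb]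
        simp [hns]
      rw [pvStepA_eq, ← hst, ← hb, hB]
      apply ih
      · exact PySem.Dict.nodup_keys_insert d st _ hnd
      · -- items invariant
        by_cases hc : d.contains st = true
        · have hcc : counts.contains st = true := by
            rw [PySem.Dict.contains_eq_decide_mem_keys, pv_keys_eq counts d hitems,
              ← PySem.Dict.contains_eq_decide_mem_keys]; exact hc
          have hget : d.get? st = some (d.getD st PySem.Set.empty) := by
            cases hq : d.get? st with
            | none => rw [PySem.Dict.contains_eq_isSome_get?, hq] at hc; simp at hc
            | some v => rw [PySem.Dict.getD_eq_get?_getD, hq]; rfl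
          have hSmem : (st, d.getD st PySem.Set.empty) ∈ d.items :=
            PySem.Dict.mem_items_of_get?_eq_some d hget
          have hcget : counts.getD st 0 = ((d.getD st PySem.Set.empty).length : Int) := by
            have hm2 : (st, ((d.getD st PySem.Set.empty).length : Int)) ∈ counts.items := by
              rw [hitems]; exact List.mem_map.mpr ⟨_, hSmem, rfl⟩
            exact PySem.Dict.getD_of_mem_items counts hm2
              (by rw [pv_keys_eq counts d hitems]; exact hnd) 0
          rw [PySem.Dict.items_insert_of_contains d _ hc,
              PySem.Dict.items_insert_of_contains counts _ hcc, hitems, List.map_map, List.map_map]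
          apply List.map_congr_left
          intro p hp
          by_cases hpk : p.1 = st
          · have hmem0 : b ∉ d.getD st ([] : List String) := hmem
            simp [Function.comp, pvF, hpk, hcget, PySem.Set.add, PySem.Set.empty, hmem0]
          · simp [Function.comp, pvF, hpk]
        · simp only [Bool.not_eq_true] at hc
          have hcc : counts.contains st = false := by
            rw [PySem.Dict.contains_eq_decide_mem_keys, pv_keys_eq counts d hitems,
              ← PySem.Dict.contains_eq_decide_mem_keys]; exact hc
          have hSe : d.getD st PySem.Set.empty = PySem.Set.empty :=
            PySem.Dict.getD_of_not_contains d _ hc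
          rw [PySem.Dict.items_insert_of_not_contains d _ hc,
              PySem.Dict.items_insert_of_not_contains counts _ hcc,
              PySem.Dict.getD_of_not_contains counts _ hcc, hitems, List.map_append, hSe]
          simp [pvF, PySem.Set.add, PySem.Set.empty]
      · -- seen invariant
        intro st' b'
        have hadd : PySem.Set.add seen (st, b) = seen ++ [(st, b)] := by
          simp [PySem.Set.add, hns]
        rw [hadd]
        simp only [PySem.Set.contains] at *
        rw [List.contains_append, hseen st' b', PySem.Dict.getD_insert]
        by_cases h1 : st' = st
        · subst h1
          by_cases h2 : b' = b
          · subst h2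
            have hmem0 : b ∉ d.getD st ([] : List String) := hmem
            simp [PySem.Set.add, PySem.Set.empty, hmem0]
          · have hmem0 : b ∉ d.getD st ([] : List String) := hmem
            simp [PySem.Set.add, PySem.Set.empty, hmem0, h2, Prod.ext_iff]
        · simp [h1, Prod.ext_iff]


-- ===== VERDICT (by name: the statement is the Claim_ definition above) =====
theorem countBasesByState_spec : Claim_equal_countBasesByState := by
  intro data _ _
  unfold Spec_countBasesByState countBasesByState countBasesByState_alt
  exact pv_loop data PySem.Dict.empty PySem.Set.empty PySem.Dict.empty
    (by simp [PySem.Dict.empty, PySem.Dict.keys])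
    (by simp [PySem.Dict.empty])
    (fun st b => by simp [PySem.Set.contains, PySem.Set.empty, PySem.Dict.empty, PySem.Dict.getD, PySem.Dict.get?])
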